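-- pv_equiv track=rewrite | github.com/estraviz/codewars | 7_kyu/Tally it up/python/solution.py | score_to_tally
-- ===== SOURCE A (Python) =====
-- def score_to_tally(score):
--     output = ""
--     while True:
--         if score <= 5:
--             return output + ("e <br>" if score == 5 else "abcd"[score - 1])
--         else:
--             output += 'e <br>'
--             score -= 5
-- ===== SOURCE B (Python) =====
-- def score_to_tally(score):
--     if score <= 5:
--         return "e <br>" if score == 5 else "abcd"[score - 1]
--     q, r = divmod(score, 5)
--     if r == 0:
--         return "e <br>" * q
--     return "e <br>" * q + "abcd"[r - 1]
-- ===== Notes on version B (the rewrite author's own statement) =====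
-- stated objective: faster
-- what changed: Replaces the subtract-5 accumulation loop with a single divmod(score, 5) and string multiplication; the score <= 5 base case is kept as is.
import Mathlib
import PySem

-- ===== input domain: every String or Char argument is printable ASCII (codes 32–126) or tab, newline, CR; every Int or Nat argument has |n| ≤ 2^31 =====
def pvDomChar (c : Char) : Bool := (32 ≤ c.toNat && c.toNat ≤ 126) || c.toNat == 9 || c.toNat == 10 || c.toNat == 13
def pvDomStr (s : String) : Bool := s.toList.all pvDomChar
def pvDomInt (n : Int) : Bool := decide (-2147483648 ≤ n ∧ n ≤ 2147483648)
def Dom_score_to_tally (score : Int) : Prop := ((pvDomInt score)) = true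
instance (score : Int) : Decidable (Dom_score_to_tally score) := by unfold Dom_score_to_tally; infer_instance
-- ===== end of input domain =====

-- B replaces A's subtract-5 accumulation loop with a single floor-divmod by 5 and
-- string repetition (objective: simpler); the score <= 5 base case is kept as is.


-- ===== PORT A =====
-- "abcd"[i - 1] as a 1-char string; none (IndexError, i ≤ -4) is excluded by Pre_ and mapped to ""
def tallyChar (i : Int) : String :=
  match PySem.Str.pyGet? "abcd" (i - 1) with
  | some c => String.ofList [c]
  | none => ""

def score_to_tally_go (output : String) (score : Int) : String :=
  if score ≤ 5 then output ++ (if score = 5 then "e <br>" else tallyChar score)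
  else score_to_tally_go (output ++ "e <br>") (score - 5)
termination_by score.toNat
decreasing_by omega

def score_to_tally (score : Int) : String := score_to_tally_go "" score

-- ===== PORT B =====
-- hand port of Python's "e <br>" * q (q ≤ 0 gives ""): exact for every Int q
def tallyRep (q : Int) : String := String.join (List.replicate q.toNat "e <br>")

def score_to_tally_alt (score : Int) : String :=
  if score ≤ 5 then (if score = 5 then "e <br>" else tallyChar score)
  else
    let q := PySem.Int.floordiv score 5
    let r := PySem.Int.mod score 5
    if r = 0 then tallyRep q
    else tallyRep q ++ tallyChar r

-- ===== PRECONDITION & SPEC =====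
-- Pre_ excludes exactly score ≤ -4, where A raises IndexError ("abcd"[score-1] out of range).
def Pre_score_to_tally (score : Int) : Prop := -3 ≤ score
instance (score : Int) : Decidable (Pre_score_to_tally score) := by unfold Pre_score_to_tally; infer_instance
def pvWitness_score_to_tally : Int := (7)

def Spec_score_to_tally (score : Int) (out : String) : Prop := out = score_to_tally_alt score
instance (score : Int) (out : String) : Decidable (Spec_score_to_tally score out) := by unfold Spec_score_to_tally; infer_instance

-- ===== CLAIM (what is proved, stated in full; the proofs are below) =====
def Claim_equal_score_to_tally : Prop := ∀ (score : Int), Dom_score_to_tally score → Pre_score_to_tally score → Spec_score_to_tally score (score_to_tally score)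

-- ===== LEMMAS AND PROOFS =====

theorem join_acc (l : List String) (a : String) :
    List.foldl (fun r s => r ++ s) a l = a ++ List.foldl (fun r s => r ++ s) "" l := by
  induction l generalizing a with
  | nil => simp
  | cons x xs ih =>
    simp only [List.foldl]
    rw [ih (a ++ x), ih ("" ++ x)]
    simp [String.append_assoc]

theorem go_acc (output : String) (score : Int) :
    score_to_tally_go output score = output ++ score_to_tally_go "" score := by
  by_cases h5 : score ≤ 5
  · conv_lhs => rw [score_to_tally_go]
    conv_rhs => rw [score_to_tally_go]
    simp [h5]
  · conv_lhs => rw [score_to_tally_go]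
    conv_rhs => rw [score_to_tally_go]
    rw [if_neg h5, if_neg h5,
        go_acc (output ++ "e <br>") (score - 5), go_acc ("" ++ "e <br>") (score - 5)]
    simp [String.append_assoc]
termination_by score.toNat
decreasing_by all_goals omega

theorem tallyRep_succ (q : Int) (h : 1 ≤ q) :
    tallyRep q = "e <br>" ++ tallyRep (q - 1) := by
  unfold tallyRep
  have hn : q.toNat = (q - 1).toNat + 1 := by omega
  rw [hn, List.replicate_succ]
  simp only [String.join, List.foldl]
  rw [join_acc]
  simp

theorem alt_step (score : Int) (h : 5 < score) :
    score_to_tally_alt score = "e <br>" ++ score_to_tally_alt (score - 5) := by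
  by_cases h10 : score ≤ 10
  · interval_cases score <;> decide
  · conv_lhs => rw [score_to_tally_alt]
    conv_rhs => rw [score_to_tally_alt]
    rw [if_neg (show ¬ score ≤ 5 by omega), if_neg (show ¬ score - 5 ≤ 5 by omega)]
    simp only [PySem.Int.floordiv_eq_ediv_of_pos (show (0:Int) < 5 by omega),
               PySem.Int.mod_eq_emod_of_pos (show (0:Int) < 5 by omega)]
    have hq : score / 5 = (score - 5) / 5 + 1 := by omega
    have hr : score % 5 = (score - 5) % 5 := by omega
    have hrep : tallyRep ((score - 5) / 5 + 1) = "e <br>" ++ tallyRep ((score - 5) / 5) := by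
      have := tallyRep_succ ((score - 5) / 5 + 1) (by omega)
      simpa using this
    rw [hq, hr]
    split_ifs with hr0 <;> simp [hrep, String.append_assoc]

theorem go_eq_alt (score : Int) (_h : -3 ≤ score) :
    score_to_tally_go "" score = score_to_tally_alt score := by
  by_cases h5 : score ≤ 5
  · conv_lhs => rw [score_to_tally_go]
    conv_rhs => rw [score_to_tally_alt]
    simp [h5]
  · conv_lhs => rw [score_to_tally_go]
    rw [if_neg h5, go_acc, go_eq_alt (score - 5) (by omega), alt_step score (by omega)]
    simp
termination_by score.toNat
decreasing_by all_goals omega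

-- ===== VERDICT (by name: the statement is the Claim_ definition above) =====
theorem score_to_tally_spec : Claim_equal_score_to_tally := by
  intro score _ hpre
  unfold Spec_score_to_tally score_to_tally
  exact go_eq_alt score hpre
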